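-- pv_equiv track=rewrite | github.com/Talha-Dmr/rag-project | src/evaluation/epistemic_research.py | aggregate_question_type_counts
-- ===== SOURCE A (Python) =====
-- from collections import Counter, defaultdict
-- from typing import Any, Dict, Iterable, Tuple
--
-- def aggregate_question_type_counts(rows: Iterable[Dict[str, Any]]) -> Dict[str, Dict[str, int]]:
--     """Count outcome buckets by question type."""
--     grouped: Dict[str, Counter[str]] = defaultdict(Counter)
--     for row in rows:
--         question_type = str(row.get("question_type") or "unknown")
--         outcome = str(row.get("outcome_bucket") or "unknown")
--         grouped[question_type][outcome] += 1
--
--     return {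
--         question_type: dict(sorted(counter.items()))
--         for question_type, counter in sorted(grouped.items())
--     }
-- ===== SOURCE B (Python) =====
-- def aggregate_question_type_counts(rows):
--     """Count outcome buckets by question type (distinct-sorted-keys + count, no accumulator dicts)."""
--     pairs = [
--         (str(r.get("question_type") or "unknown"), str(r.get("outcome_bucket") or "unknown"))
--         for r in rows
--     ]
--     return {
--         t: {o: pairs.count((t, o)) for o in sorted({o for p, o in pairs if p == t})}
--         for t in sorted({p for p, _ in pairs})
--     }
-- ===== Notes on version B (the rewrite author's own statement) =====
-- stated objective: alternative
-- what changed: A accumulates a defaultdict of Counters in one pass and then sorts keys and counter items; B never builds accumulator dicts: it materializes the normalized (type, outcome) pair list, takes the sorted distinct types and, per type, the sorted distinct outcomes, and computes each cell directly with pairs.count.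
import Mathlib
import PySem

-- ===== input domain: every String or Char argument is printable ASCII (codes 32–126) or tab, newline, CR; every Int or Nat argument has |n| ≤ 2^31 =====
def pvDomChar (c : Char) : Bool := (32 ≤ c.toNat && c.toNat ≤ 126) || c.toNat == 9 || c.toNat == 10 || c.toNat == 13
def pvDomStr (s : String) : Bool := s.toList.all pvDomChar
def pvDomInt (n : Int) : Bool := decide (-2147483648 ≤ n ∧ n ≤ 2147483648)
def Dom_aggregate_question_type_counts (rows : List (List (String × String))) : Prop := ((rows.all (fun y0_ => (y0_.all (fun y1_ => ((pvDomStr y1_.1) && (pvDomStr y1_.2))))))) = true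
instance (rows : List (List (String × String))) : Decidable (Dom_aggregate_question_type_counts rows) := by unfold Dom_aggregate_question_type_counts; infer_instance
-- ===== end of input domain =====

-- B replaces A's defaultdict-of-Counters accumulation by a direct sorted-distinct-keys +
-- pairs.count computation (alternative decomposition, same observable result).

-- str(row.get(k) or "unknown"): the values are strings, so str() is the identity;
-- a missing key (None) and the empty string (falsy) both normalize to "unknown".
def pvNorm (row : List (String × String)) (key : String) : String :=
  match (PySem.Dict.mk row).get? key with
  | some s => if s = "" then "unknown" else s
  | none => "unknown"

-- ===== PORT A =====
def aggregate_question_type_counts (rows : List (List (String × String))) : List (String × List (String × Int)) :=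
  let grouped : PySem.Dict String (PySem.Dict String Int) :=
    rows.foldl (fun g row =>
      let question_type := pvNorm row "question_type"
      let outcome := pvNorm row "outcome_bucket"
      -- grouped[question_type][outcome] += 1 on a defaultdict(Counter)
      g.insert question_type ((g.getD question_type PySem.Dict.empty).modify outcome 0 (· + 1)))
      PySem.Dict.empty
  -- sorted(grouped.items()) / dict(sorted(counter.items())): the keys are distinct, so
  -- Python's tuple comparison reduces to comparing the first components — exact here
  (PySem.List.sorted grouped.items (fun p => p.1)).map
    (fun p => (p.1, PySem.List.sorted p.2.items (fun q => q.1)))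

-- ===== PORT B =====
def aggregate_question_type_counts_alt (rows : List (List (String × String))) : List (String × List (String × Int)) :=
  let pairs := rows.map (fun r => (pvNorm r "question_type", pvNorm r "outcome_bucket"))
  -- dict comprehensions over sorted distinct keys: keys are distinct, so plain ordered lists
  (PySem.List.sorted (PySem.Set.ofList (pairs.map Prod.fst)) (fun t => t)).map
    (fun t => (t,
      (PySem.List.sorted (PySem.Set.ofList ((pairs.filter (fun p => p.1 == t)).map Prod.snd)) (fun o => o)).map
        (fun o => (o, (pairs.count (t, o) : Int)))))

-- ===== PRECONDITION & SPEC =====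
def Spec_aggregate_question_type_counts (rows : List (List (String × String))) (out : List (String × List (String × Int))) : Prop := out = aggregate_question_type_counts_alt rows
instance (rows : List (List (String × String))) (out : List (String × List (String × Int))) : Decidable (Spec_aggregate_question_type_counts rows out) := by unfold Spec_aggregate_question_type_counts; infer_instance

-- ===== CLAIM (what is proved, stated in full; the proofs are below) =====
def Claim_equal_aggregate_question_type_counts : Prop := ∀ (rows : List (List (String × String))), Dom_aggregate_question_type_counts rows → Spec_aggregate_question_type_counts rows (aggregate_question_type_counts rows)

-- ===== LEMMAS AND PROOFS =====

-- the normalized (question_type, outcome_bucket) pair of each row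
def pvPairs (rows : List (List (String × String))) : List (String × String) :=
  rows.map (fun r => (pvNorm r "question_type", pvNorm r "outcome_bucket"))

-- the outcomes of the pairs whose type is t, in order
def pvOuts (ps : List (String × String)) (t : String) : List String :=
  (ps.filter (fun p => p.1 == t)).map Prod.snd

-- A's accumulation loop, expressed over the pair list
def pvG (ps : List (String × String)) : PySem.Dict String (PySem.Dict String Int) :=
  ps.foldl (fun g q =>
    g.insert q.1 ((g.getD q.1 PySem.Dict.empty).modify q.2 0 (· + 1))) PySem.Dict.empty

lemma pvGet?_mk_map {ν : Type} (S : List String) (f : String → ν) (t : String) :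
    (PySem.Dict.mk (S.map (fun u => (u, f u)))).get? t = if t ∈ S then some (f t) else none := by
  induction S with
  | nil => simp [PySem.Dict.get?]
  | cons u S ih =>
    simp only [List.map_cons, PySem.Dict.get?_mk_cons, ih]
    by_cases h : u = t
    · subst h; simp
    · simp [h, Ne.symm h]

lemma pvOuts_append_singleton (ps : List (String × String)) (t o u : String) :
    pvOuts (ps ++ [(t, o)]) u = pvOuts ps u ++ (if u = t then [o] else []) := by
  by_cases h : u = t
  · subst h; simp [pvOuts, List.filter_append]
  · simp [pvOuts, List.filter_append, h, Ne.symm h]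

lemma pvOuts_nil_of_not_mem (ps : List (String × String)) (t : String)
    (h : t ∉ ps.map Prod.fst) : pvOuts ps t = [] := by
  have : ps.filter (fun p => p.1 == t) = [] := by
    apply List.filter_eq_nil_iff.mpr
    intro p hp
    simp only [beq_iff_eq]
    intro hpt
    exact h (List.mem_map.mpr ⟨p, hp, hpt⟩)
  simp [pvOuts, this]

lemma pvSet_ofList_append_singleton {α : Type} [BEq α] (xs : List α) (x : α) :
    PySem.Set.ofList (xs ++ [x]) = PySem.Set.add (PySem.Set.ofList xs) x := by
  simp [PySem.Set.ofList_eq_foldl, List.foldl_append]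

lemma pvG_eq (ps : List (String × String)) :
    pvG ps = PySem.Dict.mk ((PySem.Set.ofList (ps.map Prod.fst)).map
      (fun t => (t, PySem.Dict.counter (pvOuts ps t)))) := by
  induction ps using List.reverseRecOn with
  | nil => rfl
  | append_singleton ps p ih =>
    obtain ⟨t, o⟩ := p
    have hstep : pvG (ps ++ [(t, o)]) =
        (pvG ps).insert t (((pvG ps).getD t PySem.Dict.empty).modify o 0 (· + 1)) := by
      simp [pvG, List.foldl_append]
    rw [hstep, ih]
    set S := PySem.Set.ofList (ps.map Prod.fst) with hS
    have hget : ∀ u, (PySem.Dict.mk (S.map (fun t => (t, PySem.Dict.counter (pvOuts ps t))))).get? u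
        = if u ∈ S then some (PySem.Dict.counter (pvOuts ps u)) else none := fun u =>
      pvGet?_mk_map S _ u
    have hofl : PySem.Set.ofList ((ps ++ [(t, o)]).map Prod.fst) = PySem.Set.add S t := by
      rw [List.map_append]; exact pvSet_ofList_append_singleton _ _
    by_cases ht : t ∈ S
    · -- existing type: insert overwrites in place
      have hc : (PySem.Dict.mk (S.map (fun t => (t, PySem.Dict.counter (pvOuts ps t))))).contains t = true := by
        rw [PySem.Dict.contains_eq_isSome_get?, hget, if_pos ht]; rfl
      have hadd : PySem.Set.add S t = S := by
        simp [PySem.Set.add, PySem.Set.contains, ht]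
      apply PySem.Dict.ext
      rw [PySem.Dict.items_insert_of_contains _ _ hc]
      show (S.map _).map _ = _
      rw [hofl, hadd, List.map_map]
      apply List.map_congr_left
      intro u _
      have hgd : (PySem.Dict.mk (S.map (fun t => (t, PySem.Dict.counter (pvOuts ps t))))).getD t PySem.Dict.empty
          = PySem.Dict.counter (pvOuts ps t) := by
        rw [PySem.Dict.getD_eq_get?_getD, hget, if_pos ht]; rfl
      by_cases hu : u = t
      · subst hu
        simp only [Function.comp_apply, beq_self_eq_true, if_pos, hgd,
          pvOuts_append_singleton]
        rw [← PySem.Dict.counter_append_singleton]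
      · simp [Function.comp_apply, hu, pvOuts_append_singleton]
    · -- new type: insert appends
      have hc : (PySem.Dict.mk (S.map (fun t => (t, PySem.Dict.counter (pvOuts ps t))))).contains t = false := by
        rw [PySem.Dict.contains_eq_isSome_get?, hget, if_neg ht]; rfl
      have hadd : PySem.Set.add S t = S ++ [t] := by
        simp [PySem.Set.add, PySem.Set.contains, ht]
      have hgd : (PySem.Dict.mk (S.map (fun t => (t, PySem.Dict.counter (pvOuts ps t))))).getD t PySem.Dict.empty
          = PySem.Dict.empty := by
        rw [PySem.Dict.getD_eq_get?_getD, hget, if_neg ht]; rfl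
      have hto : pvOuts ps t = [] := by
        apply pvOuts_nil_of_not_mem
        intro hmem
        exact ht ((PySem.Set.mem_ofList _ _).mpr hmem)
      apply PySem.Dict.ext
      rw [PySem.Dict.items_insert_of_not_contains _ _ hc]
      show S.map _ ++ _ = _
      rw [hofl, hadd, List.map_append]
      congr 1
      · apply List.map_congr_left
        intro u hu
        have hu_ne : u ≠ t := fun h => ht (h ▸ hu)
        simp [pvOuts_append_singleton, hu_ne]
      · simp only [List.map_singleton, hgd, pvOuts_append_singleton, hto,
          List.nil_append]
        rfl
lemma pvSortedMapPair {ν : Type} (S : List String) (f : String → ν)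
    (hlt : (PySem.List.sorted S (fun s => s)).Pairwise (· < ·)) :
    PySem.List.sorted (S.map (fun u => (u, f u))) (fun p => p.1) =
      (PySem.List.sorted S (fun s => s)).map (fun u => (u, f u)) := by
  apply PySem.List.sorted_eq_of_perm_of_pairwise_lt
  · exact (PySem.List.sorted_perm S (fun s => s) false).map _
  · exact (List.pairwise_map).mpr hlt

lemma pvCountOuts (ps : List (String × String)) (t o : String) :
    (pvOuts ps t).count o = ps.count (t, o) := by
  induction ps with
  | nil => rfl
  | cons p ps ih =>
    obtain ⟨a, b⟩ := p
    by_cases ha : a = t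
    · subst ha
      by_cases hb : b = o
      · subst hb; simp [pvOuts] at ih ⊢; omega
      · simp [pvOuts, hb, Prod.ext_iff] at ih ⊢; omega
    · simp [pvOuts, ha, Prod.ext_iff] at ih ⊢; omega

lemma pvA_eq (rows : List (List (String × String))) :
    aggregate_question_type_counts rows =
      (PySem.List.sorted (PySem.Set.ofList ((pvPairs rows).map Prod.fst)) (fun t => t)).map
        (fun t => (t,
          (PySem.List.sorted (PySem.Set.ofList (pvOuts (pvPairs rows) t)) (fun o => o)).map
            (fun o => (o, ((pvOuts (pvPairs rows) t).count o : Int))))) := by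
  have hfold : aggregate_question_type_counts rows =
      (PySem.List.sorted (pvG (pvPairs rows)).items (fun p => p.1)).map
        (fun p => (p.1, PySem.List.sorted p.2.items (fun q => q.1))) := by
    unfold aggregate_question_type_counts pvG pvPairs
    rw [List.foldl_map]
  rw [hfold, pvG_eq]
  show (PySem.List.sorted (((PySem.Set.ofList ((pvPairs rows).map Prod.fst)).map
      (fun t => (t, PySem.Dict.counter (pvOuts (pvPairs rows) t))))) (fun p => p.1)).map _ = _
  rw [pvSortedMapPair _ _ (PySem.List.sorted_ofList_pairwise_lt _)]
  rw [List.map_map]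
  apply List.map_congr_left
  intro t _
  simp only [Function.comp_apply]
  congr 1
  rw [PySem.Dict.items_counter]
  exact pvSortedMapPair _ _ (PySem.List.sorted_ofList_pairwise_lt _)

-- ===== VERDICT (by name: the statement is the Claim_ definition above) =====
theorem aggregate_question_type_counts_spec : Claim_equal_aggregate_question_type_counts := by
  intro rows _
  unfold Spec_aggregate_question_type_counts
  rw [pvA_eq]
  show _ = (PySem.List.sorted (PySem.Set.ofList ((pvPairs rows).map Prod.fst)) (fun t => t)).map
    (fun t => (t,
      (PySem.List.sorted (PySem.Set.ofList (pvOuts (pvPairs rows) t)) (fun o => o)).map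
        (fun o => (o, ((pvPairs rows).count (t, o) : Int)))))
  apply List.map_congr_left
  intro t _
  congr 1
  apply List.map_congr_left
  intro o _
  rw [pvCountOuts]
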